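-- pv_equiv track=rewrite | github.com/nikunjpanchal22/code_clone_classification | python_t1_t2_full/Gpt_false_pair_2688.py | get_most_ooo_word_type_3
-- ===== SOURCE A (Python) =====
-- def get_most_ooo_word_type_3(sentence_list):
-- 	max_o_count = -1
-- 	most_ooo_words = []
--
-- 	for sentence in sentence_list:
-- 		words_in_sentence = sentence.split()
--
-- 		for word in words_in_sentence:
-- 			number_of_o = word.count('o')
--
-- 			if number_of_o > max_o_count:
-- 				max_o_count = number_of_o
-- 				most_ooo_words = [word]
--
-- 			elif number_of_o == max_o_count:
-- 				most_ooo_words.append(word)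
--
-- 	return most_ooo_words
-- ===== SOURCE B (Python) =====
-- def get_most_ooo_word_type_3(sentence_list):
--     words = [word for sentence in sentence_list for word in sentence.split()]
--     max_o = max((word.count('o') for word in words), default=-1)
--     return [word for word in words if word.count('o') == max_o]
-- ===== Notes on version B (the rewrite author's own statement) =====
-- stated objective: simpler
-- what changed: Replaces the single-pass max-tracking loop with mutable reset/append state by flatten-all-words, compute the maximum 'o'-count, then filter words equal to it.
import Mathlib
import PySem

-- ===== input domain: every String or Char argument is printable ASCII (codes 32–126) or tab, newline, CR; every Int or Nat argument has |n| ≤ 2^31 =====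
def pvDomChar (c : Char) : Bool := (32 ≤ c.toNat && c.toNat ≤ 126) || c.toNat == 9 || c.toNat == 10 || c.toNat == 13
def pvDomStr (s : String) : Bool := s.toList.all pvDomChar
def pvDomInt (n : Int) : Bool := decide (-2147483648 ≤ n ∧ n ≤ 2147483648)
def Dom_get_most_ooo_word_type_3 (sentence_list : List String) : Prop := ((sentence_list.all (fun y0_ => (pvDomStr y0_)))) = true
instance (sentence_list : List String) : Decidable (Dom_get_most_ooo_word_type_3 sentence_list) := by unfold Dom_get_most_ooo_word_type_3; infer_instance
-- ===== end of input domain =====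

-- B flattens all words, computes the maximum 'o'-count once, then filters the words
-- equal to it — a two-pass decomposition replacing A's single-pass reset/append state
-- machine; same cost, simpler (objective: simpler).

-- ===== PORT A =====
def get_most_ooo_word_type_3 (sentence_list : List String) : List String :=
  (sentence_list.foldl (fun st sentence =>
    let words_in_sentence := PySem.Str.split₀ sentence
    words_in_sentence.foldl (fun st word =>
      let number_of_o : Int := (PySem.Str.count word "o" : Int)
      if number_of_o > st.1 then (number_of_o, [word])
      else if number_of_o = st.1 then (st.1, st.2 ++ [word])
      else st) st) ((-1 : Int), ([] : List String))).2

-- ===== PORT B =====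
def get_most_ooo_word_type_3_alt (sentence_list : List String) : List String :=
  let words := sentence_list.flatMap (fun sentence => PySem.Str.split₀ sentence)
  -- max(generator, default=-1): fold of max seeded with the default
  let max_o : Int := words.foldl (fun m word => max m (PySem.Str.count word "o" : Int)) (-1)
  words.filter (fun word => (PySem.Str.count word "o" : Int) == max_o)

-- ===== PRECONDITION & SPEC =====
def Spec_get_most_ooo_word_type_3 (sentence_list : List String) (out : List String) : Prop := out = get_most_ooo_word_type_3_alt sentence_list
instance (sentence_list : List String) (out : List String) : Decidable (Spec_get_most_ooo_word_type_3 sentence_list out) := by unfold Spec_get_most_ooo_word_type_3; infer_instance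

-- ===== CLAIM (what is proved, stated in full; the proofs are below) =====
def Claim_equal_get_most_ooo_word_type_3 : Prop := ∀ (sentence_list : List String), Dom_get_most_ooo_word_type_3 sentence_list → Spec_get_most_ooo_word_type_3 sentence_list (get_most_ooo_word_type_3 sentence_list)

-- ===== LEMMAS AND PROOFS =====

def pvCnt (w : String) : Int := (PySem.Str.count w "o" : Int)

def pvStep (st : Int × List String) (w : String) : Int × List String :=
  if pvCnt w > st.1 then (pvCnt w, [w])
  else if pvCnt w = st.1 then (st.1, st.2 ++ [w]) else st

def pvFmax (m : Int) (ws : List String) : Int :=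
  ws.foldl (fun m w => max m (pvCnt w)) m

theorem le_pvFmax (ws : List String) (m : Int) : m ≤ pvFmax m ws := by
  induction ws generalizing m with
  | nil => simp [pvFmax]
  | cons w ws ih =>
    calc m ≤ max m (pvCnt w) := le_max_left _ _
    _ ≤ pvFmax (max m (pvCnt w)) ws := ih _
    _ = pvFmax m (w :: ws) := by simp [pvFmax, List.foldl_cons]

theorem pvLoop_eq (ws : List String) (m : Int) (acc : List String) :
    ws.foldl pvStep (m, acc) =
      (pvFmax m ws,
       (if m = pvFmax m ws then acc else []) ++
         ws.filter (fun w => pvCnt w == pvFmax m ws)) := by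
  induction ws generalizing m acc with
  | nil => simp [pvFmax]
  | cons w ws ih =>
    have hM : pvFmax m (w :: ws) = pvFmax (max m (pvCnt w)) ws := by
      simp [pvFmax, List.foldl_cons]
    rcases lt_trichotomy m (pvCnt w) with h | h | h
    · -- pvCnt w > m : reset
      have hM' : pvFmax m (w :: ws) = pvFmax (pvCnt w) ws := by
        rw [hM, max_eq_right h.le]
      have hstep : pvStep (m, acc) w = (pvCnt w, [w]) := by
        unfold pvStep; rw [if_pos h]
      have hle : pvCnt w ≤ pvFmax (pvCnt w) ws := le_pvFmax _ _
      have hne : ¬ m = pvFmax (pvCnt w) ws := by omega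
      rw [List.foldl_cons, hstep, ih, hM', if_neg hne]
      simp only [List.filter_cons, List.nil_append]
      by_cases hc : pvCnt w = pvFmax (pvCnt w) ws
      · rw [if_pos hc, if_pos (beq_iff_eq.mpr hc)]; rfl
      · rw [if_neg hc, if_neg (by simp [hc])]; rfl
    · -- pvCnt w = m : append
      have hM' : pvFmax m (w :: ws) = pvFmax m ws := by
        rw [hM, max_eq_left (le_of_eq h.symm)]
      have hstep : pvStep (m, acc) w = (m, acc ++ [w]) := by
        unfold pvStep
        rw [if_neg (by omega), if_pos h.symm]
      rw [List.foldl_cons, hstep, ih, hM']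
      by_cases hm : m = pvFmax m ws
      · have hc : pvCnt w = pvFmax m ws := by omega
        rw [if_pos hm, if_pos hm]
        simp only [List.filter_cons]
        rw [if_pos (beq_iff_eq.mpr hc)]
        simp
      · have hc : ¬ pvCnt w = pvFmax m ws := by omega
        simp [hm, hc]
    · -- pvCnt w < m : skip
      have hM' : pvFmax m (w :: ws) = pvFmax m ws := by
        rw [hM, max_eq_left h.le]
      have hstep : pvStep (m, acc) w = (m, acc) := by
        unfold pvStep
        rw [if_neg (by omega), if_neg (by omega)]
      have hlt : pvCnt w < pvFmax m ws := lt_of_lt_of_le h (le_pvFmax _ _)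
      have hc : ¬ pvCnt w = pvFmax m ws := by omega
      rw [List.foldl_cons, hstep, ih, hM']
      simp [hc]

theorem foldl_flatMap_step (l : List String)
    (f : String → List String) (init : Int × List String) :
    (l.flatMap f).foldl pvStep init =
      l.foldl (fun st s => (f s).foldl pvStep st) init := by
  induction l generalizing init with
  | nil => simp
  | cons s l ih => simp [List.flatMap_cons, List.foldl_append, ih]

-- ===== VERDICT (by name: the statement is the Claim_ definition above) =====
theorem get_most_ooo_word_type_3_spec : Claim_equal_get_most_ooo_word_type_3 := by
  intro sl _
  show get_most_ooo_word_type_3 sl = get_most_ooo_word_type_3_alt sl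
  unfold get_most_ooo_word_type_3 get_most_ooo_word_type_3_alt
  have hA : (sl.foldl (fun st sentence =>
      (PySem.Str.split₀ sentence).foldl (fun st word =>
        if (PySem.Str.count word "o" : Int) > st.1 then ((PySem.Str.count word "o" : Int), [word])
        else if (PySem.Str.count word "o" : Int) = st.1 then (st.1, st.2 ++ [word])
        else st) st) ((-1 : Int), ([] : List String)))
      = (sl.flatMap (fun s => PySem.Str.split₀ s)).foldl pvStep ((-1 : Int), []) := by
    rw [foldl_flatMap_step]
    rfl
  simp only []
  rw [hA, pvLoop_eq]
  simp [pvFmax, pvCnt]
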